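-- pv_equiv track=rewrite | github.com/vanschependom/KULAK_beginselen-van-programmeren | HC7/slides-les7-complexiteit-intuitief.py | loketRijenIteratiefNoCount
-- ===== SOURCE A (Python) =====
-- def loketRijenIteratiefNoCount(lengte, a='A', b='B'):
--     '''
--     Iteratieve variant dat enkel de toegelaten strings berekent
--     zonder telkens te tellen of er nog a's of b's mogen toegevoegd
--     worden. (apart bijgehouden in een lijst)
--     Parameters
--     ----------
--     lengte : int
--     a : chr
--         Het character dat mensen voorstelt die met 5€ betalen.
--     b : chr
--         Het character dat mensen voorstelt die met 10€ betalen.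
--     Returns
--     -------
--     [str]
--     '''
--     result = [""]
--     verschillen = [0]
--     for i in range(lengte):
--         oud = result
--         oudeVerschillen = verschillen
--         result = []
--         verschillen = []
--         for i in range(len(oud)):
--             # 'A' mag altijd toegevoegd worden
--             result.append(oud[i]+a)
--             verschillen.append(oudeVerschillen[i]+1)
--             # 'B' mag enkel toegevoegd worden indien
--             # er reeds meer 'A's dan 'B's voorkomen
--             if oudeVerschillen[i] > 0:
--                 result.append(oud[i]+b)
--                 verschillen.append(oudeVerschillen[i]-1)
--     return result
-- ===== SOURCE B (Python) =====
-- def loketRijenIteratiefNoCount(lengte, a='A', b='B'):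
--     '''Depth-first generation with an explicit stack instead of the
--     level-by-level iterative rebuild: each stack entry carries the
--     current string, its a-minus-b balance and the remaining length;
--     the b-child is pushed before the a-child so leaves come out in
--     a-before-b order, which equals the iterative version's order.'''
--     result = []
--     stack = [("", 0, lengte)]
--     while stack:
--         s, verschil, rest = stack.pop()
--         if rest <= 0:
--             result.append(s)
--             continue
--         if verschil > 0:
--             stack.append((s + b, verschil - 1, rest - 1))
--         stack.append((s + a, verschil + 1, rest - 1))
--     return result
-- ===== Notes on version B (the rewrite author's own statement) =====
-- stated objective: alternative
-- what changed: Replaces the iterative level-by-level rebuild of two parallel lists (result strings and their balances) with a depth-first traversal over an explicit stack of (string, balance, remaining-length) triples, pushing the b-child before the a-child so leaves are emitted directly in the original order.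
import Mathlib
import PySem

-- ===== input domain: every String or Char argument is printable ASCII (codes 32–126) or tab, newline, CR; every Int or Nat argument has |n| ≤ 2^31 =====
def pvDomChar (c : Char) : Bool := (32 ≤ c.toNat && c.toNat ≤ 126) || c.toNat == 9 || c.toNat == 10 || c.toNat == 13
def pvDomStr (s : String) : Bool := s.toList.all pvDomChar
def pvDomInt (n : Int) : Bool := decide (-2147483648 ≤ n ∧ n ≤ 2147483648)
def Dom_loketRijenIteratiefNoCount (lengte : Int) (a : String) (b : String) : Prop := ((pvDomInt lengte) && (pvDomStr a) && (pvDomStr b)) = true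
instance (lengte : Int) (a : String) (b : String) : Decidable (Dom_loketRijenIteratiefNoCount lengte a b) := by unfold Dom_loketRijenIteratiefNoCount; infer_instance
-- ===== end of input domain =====

-- B replaces A's iterative level-by-level rebuild of two parallel lists with a
-- recursive DFS over (current string, balance, remaining length); objective: alternative.

-- ===== PORT A =====
def loketRijenIteratiefNoCount (lengte : Int) (a : String) (b : String) : List String :=
  ((PySem.List.pyRange 0 lengte 1).foldl
    (fun (st : List String × List Int) _ =>
      let oud := st.1
      let oudeVerschillen := st.2
      (PySem.List.pyRange 0 (PySem.List.len oud) 1).foldl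
        (fun (acc : List String × List Int) i =>
          -- 'A' mag altijd toegevoegd worden
          let acc1 := (acc.1 ++ [PySem.List.pyGetD oud i "" ++ a],
                       acc.2 ++ [PySem.List.pyGetD oudeVerschillen i 0 + 1])
          -- 'B' mag enkel indien er reeds meer A's dan B's voorkomen
          if PySem.List.pyGetD oudeVerschillen i 0 > 0 then
            (acc1.1 ++ [PySem.List.pyGetD oud i "" ++ b],
             acc1.2 ++ [PySem.List.pyGetD oudeVerschillen i 0 - 1])
          else acc1)
        ([], []))
    ([""], [0])).1

-- ===== PORT B =====
-- Source B's while-loop: explicit DFS stack of (string, balance, remaining);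
-- stack top at the head (Python append/pop at the end), b-child pushed first
def pvLoop (a b : String) (stack : List (String × Int × Int)) (result : List String) : List String :=
  match stack with
  | [] => result
  | (s, verschil, rest) :: st =>
      if rest ≤ 0 then pvLoop a b st (result ++ [s])
      else
        pvLoop a b ((s ++ a, verschil + 1, rest - 1) ::
          ((if verschil > 0 then [(s ++ b, verschil - 1, rest - 1)] else []) ++ st)) result
termination_by (stack.map (fun t => 3 ^ (t.2.2.toNat + 1))).sum
decreasing_by
  · simp only [List.map_cons, List.sum_cons]
    have hp : 0 < 3 ^ (rest.toNat + 1) := pow_pos (by norm_num) _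
    omega
  · rename_i h
    have hk : rest.toNat = (rest - 1).toNat + 1 := by omega
    have hp : 0 < 3 ^ ((rest - 1).toNat + 1) := pow_pos (by norm_num) _
    have h3 : 3 ^ (rest.toNat + 1) = 3 ^ ((rest - 1).toNat + 1) * 3 := by
      rw [hk, pow_succ]
    by_cases hv : verschil > 0
    · simp only [dite_eq_ite, if_pos hv, List.map_cons, List.map_append, List.map_nil,
        List.sum_cons, List.sum_append, List.sum_nil]
      omega
    · simp only [dite_eq_ite, if_neg hv, List.map_cons, List.map_append, List.map_nil,
        List.sum_cons, List.sum_append, List.sum_nil]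
      omega

def loketRijenIteratiefNoCount_alt (lengte : Int) (a : String) (b : String) : List String :=
  pvLoop a b [("", 0, lengte)] []

-- ===== PRECONDITION & SPEC =====
def Spec_loketRijenIteratiefNoCount (lengte : Int) (a : String) (b : String) (out : List String) : Prop := out = loketRijenIteratiefNoCount_alt lengte a b
instance (lengte : Int) (a : String) (b : String) (out : List String) : Decidable (Spec_loketRijenIteratiefNoCount lengte a b out) := by unfold Spec_loketRijenIteratiefNoCount; infer_instance

-- ===== CLAIM (what is proved, stated in full; the proofs are below) =====
def Claim_equal_loketRijenIteratiefNoCount : Prop := ∀ (lengte : Int) (a : String) (b : String), Dom_loketRijenIteratiefNoCount lengte a b → Spec_loketRijenIteratiefNoCount lengte a b (loketRijenIteratiefNoCount lengte a b)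

-- ===== LEMMAS AND PROOFS =====

-- recursive description of one stack entry's DFS leaves
def pvDfs (a b : String) (s : String) (verschil : Int) : Nat → List String
  | 0 => [s]
  | Nat.succ n =>
      pvDfs a b (s ++ a) (verschil + 1) n ++
        (if verschil > 0 then pvDfs a b (s ++ b) (verschil - 1) n else [])

def pvG (a b : String) (t : String × Int × Int) : List String :=
  pvDfs a b t.1 t.2.1 t.2.2.toNat

theorem pvLoop_spec (a b : String) :
    ∀ (st : List (String × Int × Int)) (acc : List String),
      pvLoop a b st acc = acc ++ st.flatMap (pvG a b) := by
  intro st acc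
  induction st, acc using pvLoop.induct a b with
  | case1 acc => simp [pvLoop]
  | case2 acc s verschil rest st h ih =>
      have h0 : rest.toNat = 0 := by omega
      rw [pvLoop]
      simp only [h, if_true]
      rw [ih]
      simp [pvG, h0, pvDfs]
  | case3 acc s verschil rest st h ih =>
      have hk : rest.toNat = (rest - 1).toNat + 1 := by omega
      rw [pvLoop]
      simp only [h, if_false]
      by_cases hv : verschil > 0
      · rw [dif_pos hv] at ih
        rw [if_pos hv, ih]
        rw [List.singleton_append, List.flatMap_cons, List.flatMap_cons, List.flatMap_cons]
        have hd : pvG a b (s, verschil, rest) =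
            pvG a b (s ++ a, verschil + 1, rest - 1) ++ pvG a b (s ++ b, verschil - 1, rest - 1) := by
          simp only [pvG, hk]
          simp [pvDfs, hv]
        rw [hd]; simp [List.append_assoc]
      · rw [dif_neg hv] at ih
        rw [if_neg hv, List.nil_append] at *
        rw [ih, List.flatMap_cons, List.flatMap_cons]
        have hd : pvG a b (s, verschil, rest) = pvG a b (s ++ a, verschil + 1, rest - 1) := by
          simp only [pvG, hk]
          simp [pvDfs, hv]
        rw [hd]

-- the children of one queue state, A first then (if allowed) B
def pvChild (a b : String) (p : String × Int) : List (String × Int) :=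
  (p.1 ++ a, p.2 + 1) :: (if p.2 > 0 then [(p.1 ++ b, p.2 - 1)] else [])

def pvStep (a b : String) (l : List (String × Int)) : List (String × Int) :=
  l.flatMap (pvChild a b)

def pvIter (a b : String) : Nat → List (String × Int) → List (String × Int)
  | 0, l => l
  | Nat.succ n, l => pvIter a b n (pvStep a b l)

theorem pvGet_fst (l : List (String × Int)) (i : Int) :
    PySem.List.pyGetD (l.map Prod.fst) i "" = (PySem.List.pyGetD l i ("", 0)).1 :=
  PySem.List.pyGetD_map Prod.fst l i ("", 0)

theorem pvGet_snd (l : List (String × Int)) (i : Int) :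
    PySem.List.pyGetD (l.map Prod.snd) i 0 = (PySem.List.pyGetD l i ("", 0)).2 :=
  PySem.List.pyGetD_map Prod.snd l i ("", 0)

-- the inner fold over l, after the index fold is eliminated
def pvF (a b : String) (acc : List String × List Int) (p : String × Int) :
    List String × List Int :=
  let acc1 := (acc.1 ++ [p.1 ++ a], acc.2 ++ [p.2 + 1])
  if p.2 > 0 then (acc1.1 ++ [p.1 ++ b], acc1.2 ++ [p.2 - 1]) else acc1

theorem pvF_foldl (a b : String) (l : List (String × Int)) :
    ∀ (r : List String) (v : List Int),
      l.foldl (pvF a b) (r, v) =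
        (r ++ (pvStep a b l).map Prod.fst, v ++ (pvStep a b l).map Prod.snd) := by
  induction l with
  | nil => intro r v; simp [pvStep]
  | cons p t ih =>
      intro r v
      by_cases h : p.2 > 0 <;>
        simp [List.foldl_cons, pvF, h, ih, pvStep, pvChild, List.flatMap_cons,
          List.append_assoc]

-- the literal inner loop of port A equals pvF folded over the paired list
theorem pvInner (a b : String) (l : List (String × Int)) :
    (PySem.List.pyRange 0 (PySem.List.len (l.map Prod.fst)) 1).foldl
      (fun (acc : List String × List Int) i =>
        let acc1 := (acc.1 ++ [PySem.List.pyGetD (l.map Prod.fst) i "" ++ a],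
                     acc.2 ++ [PySem.List.pyGetD (l.map Prod.snd) i 0 + 1])
        if PySem.List.pyGetD (l.map Prod.snd) i 0 > 0 then
          (acc1.1 ++ [PySem.List.pyGetD (l.map Prod.fst) i "" ++ b],
           acc1.2 ++ [PySem.List.pyGetD (l.map Prod.snd) i 0 - 1])
        else acc1)
      ([], []) =
    ((pvStep a b l).map Prod.fst, (pvStep a b l).map Prod.snd) := by
  have hfun : (fun (acc : List String × List Int) (i : Int) =>
      let acc1 := (acc.1 ++ [PySem.List.pyGetD (l.map Prod.fst) i "" ++ a],
                   acc.2 ++ [PySem.List.pyGetD (l.map Prod.snd) i 0 + 1])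
      if PySem.List.pyGetD (l.map Prod.snd) i 0 > 0 then
        (acc1.1 ++ [PySem.List.pyGetD (l.map Prod.fst) i "" ++ b],
         acc1.2 ++ [PySem.List.pyGetD (l.map Prod.snd) i 0 - 1])
      else acc1) =
      (fun acc i => pvF a b acc (PySem.List.pyGetD l i ("", 0))) := by
    funext acc i
    simp [pvGet_fst, pvGet_snd, pvF]
  rw [hfun]
  have hlen : PySem.List.len (l.map Prod.fst) = (l.length : Int) := by
    simp [PySem.List.len]
  rw [hlen, PySem.List.foldl_pyRange_zero_pyGetD' l ("", 0) (pvF a b) ([], [])]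
  simpa using pvF_foldl a b l [] []

theorem pvOuter (a b : String) (xs : List Int) :
    ∀ (l : List (String × Int)),
      xs.foldl
        (fun (st : List String × List Int) _ =>
          let oud := st.1
          let oudeVerschillen := st.2
          (PySem.List.pyRange 0 (PySem.List.len oud) 1).foldl
            (fun (acc : List String × List Int) i =>
              let acc1 := (acc.1 ++ [PySem.List.pyGetD oud i "" ++ a],
                           acc.2 ++ [PySem.List.pyGetD oudeVerschillen i 0 + 1])
              if PySem.List.pyGetD oudeVerschillen i 0 > 0 then
                (acc1.1 ++ [PySem.List.pyGetD oud i "" ++ b],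
                 acc1.2 ++ [PySem.List.pyGetD oudeVerschillen i 0 - 1])
              else acc1)
            ([], []))
        (l.map Prod.fst, l.map Prod.snd) =
      ((pvIter a b xs.length l).map Prod.fst, (pvIter a b xs.length l).map Prod.snd) := by
  induction xs with
  | nil => intro l; simp [pvIter]
  | cons x t ih =>
      intro l
      rw [List.foldl_cons]
      have h1 := pvInner a b l
      simp only at h1 ⊢
      rw [h1]
      simpa [pvIter] using ih (pvStep a b l)

theorem pvIter_append (a b : String) (n : Nat) :
    ∀ (xs ys : List (String × Int)),
      pvIter a b n (xs ++ ys) = pvIter a b n xs ++ pvIter a b n ys := by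
  induction n with
  | zero => intro xs ys; simp [pvIter]
  | succ m ih =>
      intro xs ys
      have : pvStep a b (xs ++ ys) = pvStep a b xs ++ pvStep a b ys := by
        simp [pvStep]
      simp [pvIter, this, ih]

theorem pvDfs_iter (a b : String) (n : Nat) :
    ∀ (s : String) (d : Int),
      pvDfs a b s d n = (pvIter a b n [(s, d)]).map Prod.fst := by
  induction n with
  | zero => intro s d; simp [pvDfs, pvIter]
  | succ m ih =>
      intro s d
      have hstep : pvStep a b [(s, d)] = pvChild a b (s, d) := by simp [pvStep]
      by_cases h : d > 0
      · have hc : pvStep a b [(s, d)] = [(s ++ a, d + 1)] ++ [(s ++ b, d - 1)] := by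
          simp [pvStep, pvChild, h]
        have hrec : pvIter a b (m + 1) [(s, d)] = pvIter a b m (pvStep a b [(s, d)]) := rfl
        rw [hrec, hc, pvIter_append, List.map_append, ← ih, ← ih]
        simp [pvDfs, h]
      · simp [pvDfs, ih, pvIter, hstep, pvChild, h]

-- ===== VERDICT (by name: the statement is the Claim_ definition above) =====
theorem loketRijenIteratiefNoCount_spec : Claim_equal_loketRijenIteratiefNoCount := by
  intro lengte a b _
  unfold Spec_loketRijenIteratiefNoCount loketRijenIteratiefNoCount
  have halt : loketRijenIteratiefNoCount_alt lengte a b = pvDfs a b "" 0 lengte.toNat := by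
    unfold loketRijenIteratiefNoCount_alt
    rw [pvLoop_spec]
    simp [pvG]
  rw [halt]
  have h0 : ([""] , ([0] : List Int)) =
      (([(("" : String), (0 : Int))]).map Prod.fst, ([(("" : String), (0 : Int))]).map Prod.snd) := by
    simp
  rw [h0, pvOuter a b (PySem.List.pyRange 0 lengte 1) [("", 0)],
    pvDfs_iter a b lengte.toNat "" 0]
  simp [PySem.List.length_pyRange_one]
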